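-- pv_equiv track=rewrite | github.com/dnlopez/PyGamebase | utils.py | allocateGameFilesToMameMediaSlots
-- ===== SOURCE A (Python) =====
-- def stringEndsWith(i_str, i_endsWith, i_caseSensitive = False):
--     """
--     Params:
--      i_str:
--       (str)
--      i_endsWith:
--       (str)
--      i_caseSensitive:
--       (bool)
--
--     Returns:
--      (bool)
--     """
--     if not i_caseSensitive:
--         i_str = i_str.upper()
--         i_endsWith = i_endsWith.upper()
--
--     return i_str.endswith(i_endsWith)
--
-- def pathHasExtension(i_path, i_extensions, i_caseSensitive = False):
--     """
--     Test whether a path has a particular extension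
--
--     Params:
--      i_path:
--       (str)
--       eg. "aaa/bbb/ccc.txt"
--      i_extensions:
--       Either (str)
--        eg.
--         ".txt"
--       or (list of str)
--        Return True if path has any one of these extensions.
--        eg.
--         [".txt", ".doc"]
--      i_caseSensitive:
--       (bool)
--
--     Returns:
--      (bool)
--     """
--     if type(i_extensions) == str:
--         return stringEndsWith(i_path, i_extensions, i_caseSensitive)
--     else:
--         for extension in i_extensions:
--             if stringEndsWith(i_path, extension, i_caseSensitive):
--                 return True
--         return False
--
-- def allocateGameFilesToMameMediaSlots(i_gameFilePaths, io_availableDevices):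
--     """
--     Params:
--      i_gameFilePaths:
--       (list of str)
--      io_availableDevices:
--       (list)
--       Each element is:
--        (list)
--        List has elements:
--         0:
--          (str)
--          Media/MAME command-line option name
--          eg.
--           "cassette"
--           "cartridge"
--           "floppydisk1"
--         1:
--          (list of str)
--          Extensions of files which may go in the above slot
--          eg.
--           (for cassette) [".wav", ".cas"]
--
--     Returns:
--      Function return value:
--       (list of str)
--       MAME command-line options
--      io_availableDevices:
--       Used up devices will have been removed from this list.
--     """
--     args = []
--
--     for gameFilePath in i_gameFilePaths:
--         for availableDeviceNo, availableDevice in enumerate(io_availableDevices):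
--             deviceName, allowedFileExtensions = availableDevice
--
--             if pathHasExtension(gameFilePath, allowedFileExtensions):
--                 args.extend(["-" + deviceName, gameFilePath])
--                 del(io_availableDevices[availableDeviceNo])
--                 break
--
--     return args
-- ===== SOURCE B (Python) =====
-- def allocateGameFilesToMameMediaSlots(i_gameFilePaths, io_availableDevices):
--     used = set()
--     pairs = []
--     for gameFilePath in i_gameFilePaths:
--         hit = next(((i, name)
--                     for i, (name, extensions) in enumerate(io_availableDevices)
--                     if i not in used and
--                        any(gameFilePath.upper().endswith(extension.upper())
--                            for extension in extensions)),
--                    None)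
--         if hit is not None:
--             used.add(hit[0])
--             pairs.append(("-" + hit[1], gameFilePath))
--     io_availableDevices[:] = [d for i, d in enumerate(io_availableDevices) if i not in used]
--     return [s for pair in pairs for s in pair]
-- ===== Notes on version B (the rewrite author's own statement) =====
-- stated objective: alternative
-- what changed: B never deletes from the device list mid-iteration: it records consumed device indices in a 'used' set while matching with a single generator-based first-hit search, collects (option,path) pairs, flattens them at the end, and removes all consumed devices in one slice assignment after the loop, instead of A's enumerate-del-break mutation inside the nested loops.
import Mathlib
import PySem

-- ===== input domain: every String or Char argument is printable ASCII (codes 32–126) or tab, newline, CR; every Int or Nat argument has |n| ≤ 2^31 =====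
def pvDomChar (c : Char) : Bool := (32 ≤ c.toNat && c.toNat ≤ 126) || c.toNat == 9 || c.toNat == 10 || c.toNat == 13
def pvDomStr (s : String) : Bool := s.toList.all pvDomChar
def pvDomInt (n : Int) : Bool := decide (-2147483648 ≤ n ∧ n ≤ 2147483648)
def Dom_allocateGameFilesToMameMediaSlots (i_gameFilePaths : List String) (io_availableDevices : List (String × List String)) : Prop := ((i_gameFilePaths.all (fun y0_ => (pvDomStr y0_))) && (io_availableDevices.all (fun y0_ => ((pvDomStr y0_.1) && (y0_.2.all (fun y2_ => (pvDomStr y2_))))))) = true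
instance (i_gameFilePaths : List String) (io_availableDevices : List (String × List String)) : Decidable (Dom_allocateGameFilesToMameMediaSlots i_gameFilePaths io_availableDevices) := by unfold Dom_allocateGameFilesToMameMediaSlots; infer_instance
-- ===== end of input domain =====

-- B records consumed device indices in a 'used' set and flattens collected pairs at the end,
-- instead of A's delete-from-the-list-and-break inside the nested loops; same return value,
-- and B's Python performs the same in-place removal of consumed devices after its loop.


-- ===== PORT A =====
def pvStringEndsWith (i_str i_endsWith : String) : Bool :=
  PySem.Str.endswith (PySem.Str.upper i_str) (PySem.Str.upper i_endsWith)

-- pathHasExtension with a list argument: scan the extensions, return True on first hit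
def pvPathHasExtension (i_path : String) : List String → Bool
  | [] => false
  | e :: rest => if pvStringEndsWith i_path e then true else pvPathHasExtension i_path rest

-- the inner 'for availableDeviceNo, availableDevice in enumerate(...)' with del + break:
-- returns (args extension, device list after the possible deletion)
def pvAInner (gameFilePath : String) : List (String × List String) → List String × List (String × List String)
  | [] => ([], [])
  | (deviceName, allowedFileExtensions) :: rest =>
    if pvPathHasExtension gameFilePath allowedFileExtensions then
      (["-" ++ deviceName, gameFilePath], rest)
    else
      let r := pvAInner gameFilePath rest
      (r.1, (deviceName, allowedFileExtensions) :: r.2)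

def allocateGameFilesToMameMediaSlots (i_gameFilePaths : List String) (io_availableDevices : List (String × List String)) : List String :=
  (i_gameFilePaths.foldl (fun st gameFilePath =>
      let r := pvAInner gameFilePath st.2
      (st.1 ++ r.1, r.2)) (([] : List String), io_availableDevices)).1

-- ===== PORT B =====
-- 'hit = next(((i, name) for i, (name, extensions) in enumerate(...) if i not in used and any(...)), None)'
def pvBHit (gameFilePath : String) (devs : List (Int × (String × List String))) (used : PySem.Set Int) :
    Option (Int × String) :=
  (devs.find? (fun p =>
      !(PySem.Set.contains used p.1) &&
      p.2.2.any (fun extension =>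
        PySem.Str.endswith (PySem.Str.upper gameFilePath) (PySem.Str.upper extension)))).map
    (fun p => (p.1, p.2.1))

def allocateGameFilesToMameMediaSlots_alt (i_gameFilePaths : List String) (io_availableDevices : List (String × List String)) : List String :=
  let st := i_gameFilePaths.foldl (fun st gameFilePath =>
      match pvBHit gameFilePath (PySem.List.enumerate io_availableDevices) st.1 with
      | none => st
      | some hit => (PySem.Set.add st.1 hit.1, st.2 ++ [("-" ++ hit.2, gameFilePath)]))
    ((PySem.Set.empty : PySem.Set Int), ([] : List (String × String)))
  st.2.flatMap (fun pair => [pair.1, pair.2])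

-- ===== PRECONDITION & SPEC =====
def Spec_allocateGameFilesToMameMediaSlots (i_gameFilePaths : List String) (io_availableDevices : List (String × List String)) (out : List String) : Prop := out = allocateGameFilesToMameMediaSlots_alt i_gameFilePaths io_availableDevices
instance (i_gameFilePaths : List String) (io_availableDevices : List (String × List String)) (out : List String) : Decidable (Spec_allocateGameFilesToMameMediaSlots i_gameFilePaths io_availableDevices out) := by unfold Spec_allocateGameFilesToMameMediaSlots; infer_instance

-- ===== CLAIM (what is proved, stated in full; the proofs are below) =====
def Claim_equal_allocateGameFilesToMameMediaSlots : Prop := ∀ (i_gameFilePaths : List String) (io_availableDevices : List (String × List String)), Dom_allocateGameFilesToMameMediaSlots i_gameFilePaths io_availableDevices → Spec_allocateGameFilesToMameMediaSlots i_gameFilePaths io_availableDevices (allocateGameFilesToMameMediaSlots i_gameFilePaths io_availableDevices)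

-- ===== LEMMAS AND PROOFS =====

-- the devices still available after B has consumed the indices in 'used'
def pvRem (used : PySem.Set Int) (l : List (Int × (String × List String))) : List (String × List String) :=
  (l.filter (fun p => !(PySem.Set.contains used p.1))).map (·.2)

lemma pvExt_eq (p : String) (es : List String) :
    pvPathHasExtension p es =
      es.any (fun e => PySem.Str.endswith (PySem.Str.upper p) (PySem.Str.upper e)) := by
  induction es with
  | nil => rfl
  | cons e rest ih => simp [pvPathHasExtension, pvStringEndsWith, ih]

lemma pvEnum_lb {α : Type} (xs : List α) (s : Int) (q : Int × α) (hq : q ∈ PySem.List.enumerate xs s) :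
    s ≤ q.1 := by
  rcases (PySem.List.mem_enumerate_iff xs s q).1 hq with ⟨k, hk, rfl⟩
  simp

lemma pvHit_lb (p : String) (xs : List (String × List String)) (s : Int) (used : PySem.Set Int)
    (i : Int) (n : String) (h : pvBHit p (PySem.List.enumerate xs s) used = some (i, n)) : s ≤ i := by
  unfold pvBHit at h
  rcases Option.map_eq_some_iff.1 h with ⟨q, hq, hmap⟩
  have := pvEnum_lb xs s q (List.mem_of_find?_eq_some hq)
  cases hmap; exact this

lemma pvStep (p : String) (devs : List (String × List String)) (s : Int) (used : PySem.Set Int) :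
    pvAInner p (pvRem used (PySem.List.enumerate devs s)) =
      match pvBHit p (PySem.List.enumerate devs s) used with
      | none => ([], pvRem used (PySem.List.enumerate devs s))
      | some hit => (["-" ++ hit.2, p], pvRem (PySem.Set.add used hit.1) (PySem.List.enumerate devs s)) := by
  induction devs generalizing s used with
  | nil => simp [PySem.List.enumerate_nil, pvRem, pvBHit, pvAInner]
  | cons d rest ih =>
    obtain ⟨name, exts⟩ := d
    rw [PySem.List.enumerate_cons]
    by_cases hc : s ∈ used
    · -- head index already used: filtered out of rem, skipped by find?
      have hrem : pvRem used ((s, (name, exts)) :: PySem.List.enumerate rest (s+1))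
          = pvRem used (PySem.List.enumerate rest (s+1)) := by
        simp [pvRem, hc]
      have hhit : pvBHit p ((s, (name, exts)) :: PySem.List.enumerate rest (s+1)) used
          = pvBHit p (PySem.List.enumerate rest (s+1)) used := by
        simp [pvBHit, hc]
      rw [hrem, hhit, ih]
      cases hfind : pvBHit p (PySem.List.enumerate rest (s+1)) used with
      | none => rfl
      | some hit =>
        obtain ⟨i, n⟩ := hit
        have hi : s + 1 ≤ i := pvHit_lb p rest (s+1) used i n hfind
        simp only []
        have : pvRem (PySem.Set.add used i) ((s, (name, exts)) :: PySem.List.enumerate rest (s+1))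
            = pvRem (PySem.Set.add used i) (PySem.List.enumerate rest (s+1)) := by
          simp [pvRem, PySem.Set.mem_add, hc]
        rw [this]
    · -- head index free
      have hkeep : pvRem used ((s, (name, exts)) :: PySem.List.enumerate rest (s+1))
          = (name, exts) :: pvRem used (PySem.List.enumerate rest (s+1)) := by
        simp [pvRem, hc]
      have hbr : (exts.any (fun e => PySem.Str.endswith (PySem.Str.upper p) (PySem.Str.upper e)))
          = (exts.any (fun e => PySem.Chars.endswith (PySem.Chars.upper p.toList) (PySem.Chars.upper e.toList))) := by
        simp
      by_cases hm : (exts.any (fun e => PySem.Str.endswith (PySem.Str.upper p) (PySem.Str.upper e))) = true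
      · -- first match: A takes head and deletes it; B records index s
        have hhit : pvBHit p ((s, (name, exts)) :: PySem.List.enumerate rest (s+1)) used
            = some (s, name) := by
          have hmC : (exts.any (fun e => PySem.Chars.endswith (PySem.Chars.upper p.toList) (PySem.Chars.upper e.toList))) = true := by
            rw [← hbr]; exact hm
          simp [pvBHit, hc, hmC]
        rw [hkeep, hhit]
        simp only [pvAInner, pvExt_eq, hm, if_pos]
        have : pvRem (PySem.Set.add used s) ((s, (name, exts)) :: PySem.List.enumerate rest (s+1))
            = pvRem used (PySem.List.enumerate rest (s+1)) := by
          unfold pvRem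
          rw [List.filter_cons]
          have hh : (!(PySem.Set.contains (PySem.Set.add used s) (s, (name, exts)).1)) = false := by
            simp [PySem.Set.contains_eq_listContains, PySem.Set.mem_add]
          rw [hh]
          simp only [if_neg Bool.false_ne_true]
          congr 1
          apply List.filter_congr
          intro q hq
          have h1 := pvEnum_lb rest (s+1) q hq
          have hne : q.1 ≠ s := by omega
          simp [PySem.Set.contains_eq_listContains, PySem.Set.mem_add, hne]
        rw [this]
      · -- no match on head: A recurses keeping head; B's find? skips head
        have hhit : pvBHit p ((s, (name, exts)) :: PySem.List.enumerate rest (s+1)) used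
            = pvBHit p (PySem.List.enumerate rest (s+1)) used := by
          have hmC : (exts.any (fun e => PySem.Chars.endswith (PySem.Chars.upper p.toList) (PySem.Chars.upper e.toList))) = false := by
            rw [← hbr]; exact eq_false_of_ne_true hm
          simp [pvBHit, hc, hmC]
        rw [hkeep, hhit]
        simp only [pvAInner, pvExt_eq, hm]
        rw [ih]
        cases hfind : pvBHit p (PySem.List.enumerate rest (s+1)) used with
        | none => simp
        | some hit =>
          obtain ⟨i, n⟩ := hit
          have hi : s + 1 ≤ i := pvHit_lb p rest (s+1) used i n hfind
          simp only []
          have : pvRem (PySem.Set.add used i) ((s, (name, exts)) :: PySem.List.enumerate rest (s+1))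
              = (name, exts) :: pvRem (PySem.Set.add used i) (PySem.List.enumerate rest (s+1)) := by
            have hne : s ≠ i := by omega
            simp [pvRem, PySem.Set.mem_add, hc, hne]
          rw [this]
          simp

def pvFlat (pairs : List (String × String)) : List String :=
  pairs.flatMap (fun pair => [pair.1, pair.2])

lemma pvMain (devs0 : List (String × List String)) (paths : List String)
    (used : PySem.Set Int) (pairs : List (String × String)) :
    (paths.foldl (fun st gameFilePath =>
        let r := pvAInner gameFilePath st.2
        (st.1 ++ r.1, r.2)) (pvFlat pairs, pvRem used (PySem.List.enumerate devs0 0))).1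
      = pvFlat (paths.foldl (fun st gameFilePath =>
          match pvBHit gameFilePath (PySem.List.enumerate devs0) st.1 with
          | none => st
          | some hit => (PySem.Set.add st.1 hit.1, st.2 ++ [("-" ++ hit.2, gameFilePath)]))
        (used, pairs)).2 := by
  induction paths generalizing used pairs with
  | nil => simp
  | cons p rest ih =>
    simp only [List.foldl_cons]
    have hstep := pvStep p devs0 0 used
    cases hfind : pvBHit p (PySem.List.enumerate devs0 0) used with
    | none =>
      rw [hfind] at hstep
      simp only [] at hstep
      rw [hstep]
      simp only [List.append_nil]
      exact ih used pairs
    | some hit =>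
      obtain ⟨i, n⟩ := hit
      rw [hfind] at hstep
      simp only [] at hstep
      rw [hstep]
      have hfl : pvFlat pairs ++ ["-" ++ n, p] = pvFlat (pairs ++ [("-" ++ n, p)]) := by
        simp [pvFlat]
      rw [hfl]
      exact ih (PySem.Set.add used i) (pairs ++ [("-" ++ n, p)])

lemma pvRem_empty (devs : List (String × List String)) :
    pvRem PySem.Set.empty (PySem.List.enumerate devs 0) = devs := by
  simp [pvRem, PySem.Set.empty, PySem.Set.contains_eq_listContains, PySem.List.map_snd_enumerate]

-- ===== VERDICT (by name: the statement is the Claim_ definition above) =====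
theorem allocateGameFilesToMameMediaSlots_spec : Claim_equal_allocateGameFilesToMameMediaSlots := by
  intro paths devs _
  unfold Spec_allocateGameFilesToMameMediaSlots
  unfold allocateGameFilesToMameMediaSlots allocateGameFilesToMameMediaSlots_alt
  have h := pvMain devs paths PySem.Set.empty []
  rw [pvRem_empty] at h
  simpa [pvFlat] using h
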